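-- pv_equiv track=rewrite | github.com/hasibhusic11-commits/ai-threat-investigation-platform | app/incidents.py | _incident_title
-- ===== SOURCE A (Python) =====
-- from typing import Any
--
-- def _incident_title(events: list[dict[str, Any]]) -> str:
--     scenario = events[0].get("scenario")
--     if scenario:
--         return scenario
--
--     event_types = sorted(set(e.get("event_type", "unknown") for e in events))
--     if len(event_types) == 1:
--         return f"{event_types[0].title()} Activity"
--     return "Correlated Suspicious Activity"
-- ===== SOURCE B (Python) =====
-- def _incident_title(events: list) -> str:
--     head, *tail = events
--     scenario = head.get("scenario")
--     if scenario:
--         return scenario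
--     first = head.get("event_type", "unknown")
--     for e in tail:
--         if e.get("event_type", "unknown") != first:
--             return "Correlated Suspicious Activity"
--     return first.title() + " Activity"
-- ===== Notes on version B (the rewrite author's own statement) =====
-- stated objective: simpler
-- what changed: Replaces building, deduplicating and sorting the set of event types with an early-exit scan of the tail that returns the correlated title as soon as one event's type differs from the first event's type.
import Mathlib
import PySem

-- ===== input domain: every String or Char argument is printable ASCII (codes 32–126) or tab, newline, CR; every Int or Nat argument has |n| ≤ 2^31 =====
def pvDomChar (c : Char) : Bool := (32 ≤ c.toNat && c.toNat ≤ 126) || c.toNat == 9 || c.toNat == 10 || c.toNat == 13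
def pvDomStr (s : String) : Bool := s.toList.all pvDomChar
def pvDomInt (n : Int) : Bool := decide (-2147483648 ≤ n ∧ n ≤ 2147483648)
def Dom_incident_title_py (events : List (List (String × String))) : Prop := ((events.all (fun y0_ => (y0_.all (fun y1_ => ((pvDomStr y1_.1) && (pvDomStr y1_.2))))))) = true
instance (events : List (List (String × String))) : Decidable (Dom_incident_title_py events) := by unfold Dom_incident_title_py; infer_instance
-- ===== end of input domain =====

-- B replaces A's build-set / sort / measure-length pipeline with an early-exit scan of the
-- tail that bails out as soon as one event's type differs from the first event's type: simpler.

-- ===== PORT A =====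
-- hand port of str.title(), exact on the ASCII domain: a letter is uppercased when the
-- previous character is not a letter, lowercased otherwise; other characters unchanged
def pyIsAlpha (c : Char) : Bool := ('a' ≤ c && c ≤ 'z') || ('A' ≤ c && c ≤ 'Z')

def pyTitleAux : List Char → Bool → List Char
  | [], _ => []
  | c :: rest, prevAlpha =>
    (if pyIsAlpha c then (if prevAlpha then c.toLower else c.toUpper) else c)
      :: pyTitleAux rest (pyIsAlpha c)

def pyTitle (s : String) : String := String.ofList (pyTitleAux s.toList false)

def incident_title_py (events : List (List (String × String))) : String :=
  match events with
  | [] => ""  -- events[0] raises IndexError in Python; excluded by Pre_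
  | e0 :: _ =>
    -- events[0].get("scenario") with string truthiness: absent or "" is falsy
    let scenario := (PySem.Dict.ofList e0).getD "scenario" ""
    if scenario ≠ "" then scenario
    else
      let event_types :=
        PySem.List.sorted
          (PySem.Set.ofList (events.map (fun e => (PySem.Dict.ofList e).getD "event_type" "unknown")))
          (fun x => x) false
      match event_types with
      | [t] => pyTitle t ++ " Activity"   -- len(event_types) == 1
      | _ => "Correlated Suspicious Activity"

-- ===== PORT B =====
-- B's port of str.title(): a left fold carrying (reversed output, previous-char-is-letter)
def titleStep (acc : List Char × Bool) (c : Char) : List Char × Bool :=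
  ((if pyIsAlpha c then (if acc.2 then c.toLower else c.toUpper) else c) :: acc.1, pyIsAlpha c)

def pyTitleB (s : String) : String :=
  String.ofList (s.toList.foldl titleStep ([], false)).1.reverse

-- the early-exit for-loop over the tail (`for e in tail: if … != first: return …`)
def scanTypes (first : String) : List (List (String × String)) → String
  | [] => pyTitleB first ++ " Activity"
  | e :: rest =>
    if (PySem.Dict.ofList e).getD "event_type" "unknown" ≠ first
    then "Correlated Suspicious Activity"
    else scanTypes first rest

def incident_title_py_alt (events : List (List (String × String))) : String :=
  match events with
  | [] => ""  -- `head, *tail = events` raises ValueError in Python; excluded by Pre_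
  | head :: tail =>
    let scenario := (PySem.Dict.ofList head).getD "scenario" ""
    if scenario ≠ "" then scenario
    else scanTypes ((PySem.Dict.ofList head).getD "event_type" "unknown") tail

-- ===== PRECONDITION & SPEC =====
-- Pre_ excludes only the empty events list, on which A raises IndexError.
def Pre_incident_title_py (events : List (List (String × String))) : Prop := events ≠ []
instance (events : List (List (String × String))) : Decidable (Pre_incident_title_py events) := by unfold Pre_incident_title_py; infer_instance
def pvWitness_incident_title_py : (List (List (String × String))) := [[("event_type", "scan")]]

def Spec_incident_title_py (events : List (List (String × String))) (out : String) : Prop := out = incident_title_py_alt events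
instance (events : List (List (String × String))) (out : String) : Decidable (Spec_incident_title_py events out) := by unfold Spec_incident_title_py; infer_instance

-- ===== CLAIM =====
def Claim_equal_incident_title_py : Prop := ∀ (events : List (List (String × String))), Dom_incident_title_py events → Pre_incident_title_py events → Spec_incident_title_py events (incident_title_py events)

-- ===== LEMMAS AND PROOFS =====

-- B's fold-based title agrees with A's recursive title
theorem titleFold_eq (l : List Char) (b : Bool) (acc : List Char) :
    (l.foldl titleStep (acc, b)).1 = (pyTitleAux l b).reverse ++ acc := by
  induction l generalizing b acc with
  | nil => simp [pyTitleAux]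
  | cons c rest ih => simp [List.foldl_cons, titleStep, pyTitleAux, ih]

theorem pyTitleB_eq (s : String) : pyTitleB s = pyTitle s := by
  simp [pyTitleB, pyTitle, titleFold_eq]

theorem scanTypes_all (first : String) (l : List (List (String × String)))
    (h : ∀ e ∈ l, (PySem.Dict.ofList e).getD "event_type" "unknown" = first) :
    scanTypes first l = pyTitleB first ++ " Activity" := by
  induction l with
  | nil => rfl
  | cons e rest ih =>
    have he := h e (List.mem_cons_self ..)
    simp only [scanTypes, he, ne_eq, not_true_eq_false, if_false]
    exact ih (fun x hx => h x (List.mem_cons_of_mem _ hx))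

theorem scanTypes_exists (first : String) (l : List (List (String × String)))
    (h : ∃ e ∈ l, (PySem.Dict.ofList e).getD "event_type" "unknown" ≠ first) :
    scanTypes first l = "Correlated Suspicious Activity" := by
  induction l with
  | nil => obtain ⟨e, he, _⟩ := h; cases he
  | cons e rest ih =>
    by_cases hne : (PySem.Dict.ofList e).getD "event_type" "unknown" ≠ first
    · simp [scanTypes, hne]
    · simp only [scanTypes, hne, if_false]
      apply ih
      obtain ⟨x, hx, hxne⟩ := h
      rcases List.mem_cons.mp hx with rfl | hx'
      · exact absurd hxne hne
      · exact ⟨x, hx', hxne⟩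

theorem nodup_all_eq_singleton {α : Type} {l : List α} {v : α}
    (hnd : l.Nodup) (hv : v ∈ l) (hall : ∀ x ∈ l, x = v) : l = [v] := by
  cases l with
  | nil => cases hv
  | cons a t =>
    have ha : a = v := hall a (List.mem_cons_self ..)
    cases t with
    | nil => simp [ha]
    | cons b t' =>
      exfalso
      have hb : b = v := hall b (by simp)
      have := List.nodup_cons.mp hnd
      exact this.1 (by simp [ha, hb])

theorem mem_sorted_ofList {xs : List String} {x : String} :
    x ∈ PySem.List.sorted (PySem.Set.ofList xs) (fun y => y) false ↔ x ∈ xs := by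
  rw [PySem.List.mem_sorted, PySem.Set.mem_ofList]

-- ===== VERDICT =====
theorem incident_title_py_spec : Claim_equal_incident_title_py := by
  intro events _ hpre
  unfold Spec_incident_title_py
  cases events with
  | nil => exact absurd rfl hpre
  | cons e0 rest =>
    simp only [incident_title_py, incident_title_py_alt]
    by_cases hsc : (PySem.Dict.ofList e0).getD "scenario" "" ≠ ""
    · simp [hsc]
    · simp only [hsc, if_false]
      set f : List (String × String) → String :=
        fun e => (PySem.Dict.ofList e).getD "event_type" "unknown" with hf
      set v : String := f e0 with hv
      set xs : List String := (e0 :: rest).map f with hxs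
      have hvxs : v ∈ xs := by rw [hxs]; exact List.mem_map.mpr ⟨e0, by simp, hv.symm⟩
      by_cases hall : ∀ e ∈ rest, f e = v
      · -- all event types equal the first one: B's scan runs off the end
        have hxall : ∀ x ∈ xs, x = v := by
          intro x hx
          rw [hxs] at hx
          obtain ⟨e, he, rfl⟩ := List.mem_map.mp hx
          rcases List.mem_cons.mp he with rfl | he'
          · exact hv.symm
          · exact hall e he'
        have hset : PySem.Set.ofList xs = [v] :=
          nodup_all_eq_singleton (PySem.Set.nodup_ofList xs)
            ((PySem.Set.mem_ofList xs v).mpr hvxs)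
            (fun x hx => hxall x ((PySem.Set.mem_ofList xs x).mp hx))
        have hsorted : PySem.List.sorted (PySem.Set.ofList xs) (fun x => x) false = [v] := by
          rw [hset]
          exact PySem.List.sorted_eq_self_of_pairwise [v] (fun x => x) (List.pairwise_singleton _ _)
        rw [hsorted, scanTypes_all v rest hall, pyTitleB_eq]
      · -- some tail event's type differs: B's scan exits early
        push Not at hall
        obtain ⟨e, he, hne⟩ := hall
        rw [scanTypes_exists v rest ⟨e, he, hne⟩]
        have hexs : f e ∈ xs := by
          rw [hxs]; exact List.mem_map.mpr ⟨e, List.mem_cons_of_mem _ he, rfl⟩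
        cases hst : PySem.List.sorted (PySem.Set.ofList xs) (fun x => x) false with
        | nil =>
          exfalso
          have := mem_sorted_ofList.mpr hvxs
          rw [hst] at this
          cases this
        | cons t ts =>
          cases ts with
          | nil =>
            exfalso
            have h1 : v ∈ [t] := by rw [← hst]; exact mem_sorted_ofList.mpr hvxs
            have h2 : f e ∈ [t] := by rw [← hst]; exact mem_sorted_ofList.mpr hexs
            simp only [List.mem_singleton] at h1 h2
            exact hne (h2.trans h1.symm)
          | cons t2 ts' => simp
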